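-- pv_equiv track=rewrite | github.com/laurenlsun/ITP115 | helper.py | getParksList
-- ===== SOURCE A (Python) =====
-- def getParksList(coastersList):
--     parkNamesList = [] # Create a variable to hold a list of park names.
--     for coaster in coastersList: # Loop through the list of coasters.
--         if "park" in coaster.keys(): # if a park is specified
--             if coaster["park"].strip() not in parkNamesList:
--                 parkNamesList.append(coaster["park"].strip())
--                 # Get the park name from the dictionary and add it to the list if it is not already in the list.
--     parkNamesList.sort() # sort the list
--     return parkNamesList
-- ===== SOURCE B (Python) =====
-- def getParksList(coastersList):
--     # Sort-first strategy: gather every stripped park name (duplicates kept),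
--     # sort, then drop adjacent duplicates by pairing each name with its
--     # predecessor via a shifted zip.
--     names = sorted(coaster["park"].strip() for coaster in coastersList if "park" in coaster)
--     return [x for x, prev in zip(names, [None] + names) if x != prev]
-- ===== Notes on version B (the rewrite author's own statement) =====
-- stated objective: alternative
-- what changed: Instead of scanning the growing output list for membership before each append and sorting the distinct names at the end, B collects all stripped names with duplicates in a comprehension, sorts once, and removes duplicates in a single pass that zips the sorted list with its shifted self and keeps each name only when it differs from its predecessor.
import Mathlib
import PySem

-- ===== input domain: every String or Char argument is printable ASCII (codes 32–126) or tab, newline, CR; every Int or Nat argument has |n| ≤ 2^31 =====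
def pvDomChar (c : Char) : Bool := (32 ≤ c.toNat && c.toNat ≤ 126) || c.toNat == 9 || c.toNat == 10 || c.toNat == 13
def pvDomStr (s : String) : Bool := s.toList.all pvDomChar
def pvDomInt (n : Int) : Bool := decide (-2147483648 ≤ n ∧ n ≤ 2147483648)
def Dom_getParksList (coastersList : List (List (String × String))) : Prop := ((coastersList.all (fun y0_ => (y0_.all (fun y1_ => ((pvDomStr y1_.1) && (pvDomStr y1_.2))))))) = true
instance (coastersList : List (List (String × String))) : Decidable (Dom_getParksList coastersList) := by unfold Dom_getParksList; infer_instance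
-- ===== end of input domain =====

-- B differs from A by sorting the duplicate-carrying name list first and removing
-- adjacent duplicates with a shifted-zip pass, instead of a membership scan before each append.

-- ===== PORT A =====
def getParksList (coastersList : List (List (String × String))) : List String :=
  let parkNamesList :=
    coastersList.foldl (fun acc coaster =>
      match (PySem.Dict.mk coaster).get? "park" with
      | some v =>
          if PySem.Str.strip v ∈ acc then acc else acc ++ [PySem.Str.strip v]
      | none => acc) []
  PySem.List.sorted parkNamesList (fun x => x) false

-- ===== PORT B =====
-- `sorted(gen)` → filterMap (the comprehension/generator) then PySem.List.sorted;
-- the `zip(names, [None] + names)` comprehension → zip with `none :: names.map some`,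
-- filter on `x != prev` (None compares unequal to every string), map fst.
def getParksList_alt (coastersList : List (List (String × String))) : List String :=
  let names := PySem.List.sorted
    (coastersList.filterMap (fun coaster =>
      ((PySem.Dict.mk coaster).get? "park").map PySem.Str.strip))
    (fun x => x) false
  ((names.zip ((none : Option String) :: names.map some)).filter
      (fun p => some p.1 != p.2)).map Prod.fst

-- ===== PRECONDITION & SPEC =====
def Spec_getParksList (coastersList : List (List (String × String))) (out : List String) : Prop := out = getParksList_alt coastersList
instance (coastersList : List (List (String × String))) (out : List String) : Decidable (Spec_getParksList coastersList out) := by unfold Spec_getParksList; infer_instance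

-- ===== CLAIM (what is proved, stated in full; the proofs are below) =====
def Claim_equal_getParksList : Prop := ∀ (coastersList : List (List (String × String))), Dom_getParksList coastersList → Spec_getParksList coastersList (getParksList coastersList)

-- ===== LEMMAS AND PROOFS =====

-- the stream of stripped park names both versions consume
def pvExtract (cs : List (List (String × String))) : List String :=
  cs.filterMap (fun c => ((PySem.Dict.mk c).get? "park").map PySem.Str.strip)

lemma pvA_fold_eq (cs : List (List (String × String))) (acc : List String) :
    cs.foldl (fun acc coaster =>
      match (PySem.Dict.mk coaster).get? "park" with
      | some v =>
          if PySem.Str.strip v ∈ acc then acc else acc ++ [PySem.Str.strip v]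
      | none => acc) acc = PySem.Set.update acc (pvExtract cs) := by
  induction cs generalizing acc with
  | nil => simp [pvExtract, PySem.Set.update]
  | cons c cs ih =>
    simp only [List.foldl_cons, pvExtract, List.filterMap_cons]
    cases h : (PySem.Dict.mk c).get? "park" with
    | none => simpa [pvExtract] using ih acc
    | some v =>
      simp only [Option.map_some, PySem.Set.update, List.foldl_cons]
      rw [ih]
      congr 1
      simp [PySem.Set.add, PySem.Set.contains]

-- recursive view of the adjacent-dedup pass: names dropped while equal to the predecessor
def pvDDA (l : String) : List String → List String
  | [] => []
  | y :: ys => if y = l then pvDDA l ys else y :: pvDDA y ys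

def pvDD : List String → List String
  | [] => []
  | x :: xs => x :: pvDDA x xs

lemma pvZip_aux (s : List String) : ∀ l : String,
    ((s.zip (s.map some)).filter (fun p => some p.1 != p.2)).map Prod.fst = [] ∧
    ((s.zip (some l :: s.map some)).filter (fun p => some p.1 != p.2)).map Prod.fst
      = pvDDA l s := by
  induction s with
  | nil => intro l; simp [pvDDA]
  | cons y ys ih =>
    intro l
    constructor
    · simp only [List.map_cons, List.zip_cons_cons, List.filter_cons]
      simpa using (ih y).1
    · by_cases hy : y = l
      · subst hy
        simpa [pvDDA] using (ih y).2
      · have : (some y != some l) = true := by simp [hy]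
        simp only [List.zip_cons_cons, List.filter_cons, this, if_true, List.map_cons,
          pvDDA, if_neg hy]
        exact congrArg (y :: ·) (ih y).2

lemma pvZip_eq_pvDD (s : List String) :
    ((s.zip ((none : Option String) :: s.map some)).filter
      (fun p => some p.1 != p.2)).map Prod.fst = pvDD s := by
  cases s with
  | nil => rfl
  | cons x xs =>
    simp only [List.zip_cons_cons, List.filter_cons, pvDD]
    have h0 : (some x != (none : Option String)) = true := by simp
    rw [h0]
    simpa using congrArg (x :: ·) (pvZip_aux xs x).2

lemma pvDDA_spec (s : List String) : ∀ (l : String), s.Pairwise (· ≤ ·) → (∀ y ∈ s, l ≤ y) →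
    (pvDDA l s).Pairwise (· < ·) ∧ (∀ a, a ∈ pvDDA l s ↔ a ∈ s ∧ a ≠ l) ∧
      (∀ a ∈ pvDDA l s, l < a) := by
  induction s with
  | nil => intro l _ _; simp [pvDDA]
  | cons y ys ih =>
    intro l hp hl
    have hy : ∀ z ∈ ys, y ≤ z := (List.pairwise_cons.mp hp).1
    have hp' := (List.pairwise_cons.mp hp).2
    by_cases hyl : y = l
    · subst hyl
      have hdd : pvDDA y (y :: ys) = pvDDA y ys := by simp [pvDDA]
      have ⟨h1, h2, h3⟩ := ih y hp' hy
      rw [hdd]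
      refine ⟨h1, ?_, h3⟩
      intro a
      rw [h2, List.mem_cons]
      constructor
      · rintro ⟨ha, hne⟩; exact ⟨Or.inr ha, hne⟩
      · rintro ⟨h', hne⟩
        rcases h' with rfl | ha
        · exact absurd rfl hne
        · exact ⟨ha, hne⟩
    · have hly : l < y := lt_of_le_of_ne (hl y (by simp)) (fun h => hyl h.symm)
      have hdd : pvDDA l (y :: ys) = y :: pvDDA y ys := by simp [pvDDA, hyl]
      have ⟨h1, h2, h3⟩ := ih y hp' hy
      have mem_gt : ∀ a ∈ pvDDA y ys, y < a := h3
      rw [hdd]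
      refine ⟨?_, ?_, ?_⟩
      · exact List.pairwise_cons.mpr ⟨mem_gt, h1⟩
      · intro a
        simp only [List.mem_cons, h2]
        constructor
        · rintro (rfl | ⟨ha, _⟩)
          · exact ⟨Or.inl rfl, fun h => hyl h⟩
          · have : y ≤ a := hy a ha
            exact ⟨Or.inr ha, fun h => absurd (h ▸ hly) (not_lt.mpr (h ▸ this))⟩
        · rintro ⟨(rfl | ha), hne⟩
          · exact Or.inl rfl
          · by_cases hay : a = y
            · exact Or.inl hay
            · exact Or.inr ⟨ha, hay⟩
      · intro a ha
        simp only [List.mem_cons] at ha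
        rcases ha with rfl | ha
        · exact hly
        · exact hly.trans (mem_gt a ha)

lemma pvDD_spec (s : List String) (hp : s.Pairwise (· ≤ ·)) :
    (pvDD s).Pairwise (· < ·) ∧ (∀ a, a ∈ pvDD s ↔ a ∈ s) := by
  cases s with
  | nil => simp [pvDD]
  | cons x xs =>
    have hy : ∀ z ∈ xs, x ≤ z := (List.pairwise_cons.mp hp).1
    have ⟨h1, h2, h3⟩ := pvDDA_spec xs x (List.pairwise_cons.mp hp).2 hy
    constructor
    · exact List.pairwise_cons.mpr ⟨h3, h1⟩
    · intro a
      simp only [pvDD, List.mem_cons, h2]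
      constructor
      · rintro (rfl | ⟨ha, _⟩); exacts [Or.inl rfl, Or.inr ha]
      · rintro (rfl | ha)
        · exact Or.inl rfl
        · by_cases hax : a = x
          · exact Or.inl hax
          · exact Or.inr ⟨ha, hax⟩

-- ===== VERDICT (by name: the statement is the Claim_ definition above) =====
theorem getParksList_spec : Claim_equal_getParksList := by
  intro cs _
  unfold Spec_getParksList getParksList getParksList_alt
  rw [pvA_fold_eq]
  rw [pvZip_eq_pvDD]
  have hsp : (PySem.List.sorted (pvExtract cs) (fun x => x) false).Pairwise (· ≤ ·) := by
    simpa using PySem.List.sorted_pairwise (pvExtract cs) (fun x => x)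
  have ⟨hlt, hmem⟩ := pvDD_spec _ hsp
  have hupd : PySem.Set.update ([] : List String) (pvExtract cs) = PySem.Set.ofList (pvExtract cs) := rfl
  rw [hupd]
  refine PySem.List.sorted_eq_of_perm_of_pairwise_lt _ _ _ ?_ hlt
  refine (List.perm_ext_iff_of_nodup (hlt.imp ne_of_lt) (PySem.Set.nodup_ofList _)).mpr ?_
  intro a
  rw [hmem a, PySem.List.mem_sorted, PySem.Set.mem_ofList]
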